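-- pv_equiv track=rewrite | github.com/namn44241/Toan_roi_rac | Bai 1. To hop - Chinh hop/Ex 4.py | count_ways_to_sum
-- ===== SOURCE A (Python) =====
-- def count_ways_to_sum(n):
--     MOD = 10 ** 9 + 7
--
--     dp = [0] * (2 * n + 1)
--     dp[0] = 1
--
--     for i in range(1, 2 * n + 1):
--         dp[i] = 0
--         for j in range(1, 7):
--             if i - j >= 0:
--                 dp[i] = (dp[i] + dp[i - j]) % MOD
--
--     return dp[2 * n]
-- ===== SOURCE B (Python) =====
-- def count_ways_to_sum(n):
--     # Matrix exponentiation: f(i) = sum_{j=1..6} f(i-j) mod p, so the state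
--     # vector (f(i),...,f(i-5)) evolves by the 6x6 companion matrix C and the
--     # answer is (C^(2n))[0][0].  O(log n) instead of O(n).
--     MOD = 10 ** 9 + 7
--
--     def mat_mult(A, B):
--         return [[sum(A[i][k] * B[k][j] for k in range(6)) % MOD
--                  for j in range(6)] for i in range(6)]
--
--     def mat_pow(R, M, e):
--         while e > 0:
--             if e % 2 == 1:
--                 R = mat_mult(R, M)
--             M = mat_mult(M, M)
--             e //= 2
--         return R
--
--     I = [[1 if i == j else 0 for j in range(6)] for i in range(6)]
--     C = [[1, 1, 1, 1, 1, 1],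
--          [1, 0, 0, 0, 0, 0],
--          [0, 1, 0, 0, 0, 0],
--          [0, 0, 1, 0, 0, 0],
--          [0, 0, 0, 1, 0, 0],
--          [0, 0, 0, 0, 1, 0]]
--     return mat_pow(I, C, 2 * n)[0][0]
-- ===== Notes on version B (the rewrite author's own statement) =====
-- stated objective: faster
-- what changed: Replaces the O(n) bottom-up dp table over all sums 0..2n by binary exponentiation of the 6x6 companion matrix of the recurrence, reading the answer off entry [0][0] of C^(2n).
import Mathlib
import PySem

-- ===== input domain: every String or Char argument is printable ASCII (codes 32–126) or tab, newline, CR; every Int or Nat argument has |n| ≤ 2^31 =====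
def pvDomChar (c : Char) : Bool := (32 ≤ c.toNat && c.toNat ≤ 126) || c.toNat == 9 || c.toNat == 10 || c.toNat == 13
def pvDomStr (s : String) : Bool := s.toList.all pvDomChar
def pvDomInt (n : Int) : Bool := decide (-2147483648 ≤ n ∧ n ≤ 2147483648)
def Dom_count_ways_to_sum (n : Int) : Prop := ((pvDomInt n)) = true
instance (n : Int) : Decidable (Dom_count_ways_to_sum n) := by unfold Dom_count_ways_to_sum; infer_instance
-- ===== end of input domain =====

-- B replaces A's O(n) dp loop by binary exponentiation of the 6x6 companion matrix of the
-- recurrence (O(log n) matrix multiplications).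


-- ===== PORT A =====
-- Python lists are 0-indexed Arrays here; all indices A touches are in range when n ≥ 0.
def count_ways_to_sum (n : Int) : Int :=
  let MOD : Int := 10 ^ 9 + 7
  let dp : Array Int := Array.replicate (2 * n + 1).toNat 0   -- dp = [0] * (2*n + 1)
  let dp := dp.setIfInBounds 0 1                              -- dp[0] = 1 (IndexError when n < 0: excluded by Pre_)
  let dp := (PySem.List.pyRange 1 (2 * n + 1) 1).foldl (fun dp i =>
    let dp := dp.setIfInBounds i.toNat 0                      -- dp[i] = 0
    (PySem.List.pyRange 1 7 1).foldl (fun dp j =>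
      if i - j ≥ 0 then
        dp.setIfInBounds i.toNat
          (PySem.Int.mod (dp.getD i.toNat 0 + dp.getD (i - j).toNat 0) MOD)
      else dp) dp) dp
  dp.getD (2 * n).toNat 0                                     -- return dp[2*n]

-- ===== PORT B =====
-- mat_mult(A, B): 6x6 product with each entry reduced mod 10^9+7 (indices are all in range 0..5)
def pvMatMult (A B : List (List Int)) : List (List Int) :=
  (List.range 6).map (fun i =>
    (List.range 6).map (fun j =>
      PySem.Int.mod ((List.range 6).foldl
        (fun s k => s + ((A.getD i []).getD k 0) * ((B.getD k []).getD j 0)) 0)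
        (10 ^ 9 + 7)))

-- mat_pow(R, M, e): the 'while e > 0' loop as recursion on e (e ≤ 0 returns R at once)
def pvMatPow (R M : List (List Int)) (e : Nat) : List (List Int) :=
  if h : e = 0 then R
  else pvMatPow (if e % 2 = 1 then pvMatMult R M else R) (pvMatMult M M) (e / 2)
termination_by e
decreasing_by exact Nat.div_lt_self (Nat.pos_of_ne_zero h) (by norm_num)

def pvI : List (List Int) :=
  (List.range 6).map (fun i => (List.range 6).map (fun j => if i = j then (1 : Int) else 0))

def pvC : List (List Int) :=
  [[1, 1, 1, 1, 1, 1],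
   [1, 0, 0, 0, 0, 0],
   [0, 1, 0, 0, 0, 0],
   [0, 0, 1, 0, 0, 0],
   [0, 0, 0, 1, 0, 0],
   [0, 0, 0, 0, 1, 0]]

def count_ways_to_sum_alt (n : Int) : Int :=
  -- 'while e > 0' never runs for e ≤ 0, so e = (2*n).toNat; the result is always 6x6, so
  -- the final [0][0] indexing is in range and getD is exact.
  ((pvMatPow pvI pvC (2 * n).toNat).getD 0 []).getD 0 0

-- ===== PRECONDITION & SPEC =====
-- Pre_ excludes exactly the negative inputs, on which Python A raises IndexError (dp is the empty list).
def Pre_count_ways_to_sum (n : Int) : Prop := 0 ≤ n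
instance (n : Int) : Decidable (Pre_count_ways_to_sum n) := by unfold Pre_count_ways_to_sum; infer_instance
def pvWitness_count_ways_to_sum : Int := 3

def Spec_count_ways_to_sum (n : Int) (out : Int) : Prop := out = count_ways_to_sum_alt n
instance (n : Int) (out : Int) : Decidable (Spec_count_ways_to_sum n out) := by unfold Spec_count_ways_to_sum; infer_instance

-- ===== CLAIM (what is proved, stated in full; the proofs are below) =====
def Claim_equal_count_ways_to_sum : Prop := ∀ (n : Int), Dom_count_ways_to_sum n → Pre_count_ways_to_sum n → Spec_count_ways_to_sum n (count_ways_to_sum n)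

-- ===== LEMMAS AND PROOFS =====

def pvM : Int := 10 ^ 9 + 7

-- ---------- the reference sequence pvg : the dp values of A ----------
-- one window step: (dp[i], dp[i-1], …, dp[i-5]) ↦ (dp[i+1], dp[i], …, dp[i-4])
def pvStep (w : Int × Int × Int × Int × Int × Int) : Int × Int × Int × Int × Int × Int :=
  (PySem.Int.mod (w.1 + w.2.1 + w.2.2.1 + w.2.2.2.1 + w.2.2.2.2.1 + w.2.2.2.2.2) pvM,
   w.1, w.2.1, w.2.2.1, w.2.2.2.1, w.2.2.2.2.1)

def pvW (k : Nat) : Int × Int × Int × Int × Int × Int := pvStep^[k] (1, 0, 0, 0, 0, 0)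

def pvg (k : Nat) : Int := (pvW k).1

-- window component j (1..5): pvg (k - j), and 0 below index 0
def pvgs (j k : Nat) : Int := if k < j then 0 else pvg (k - j)

lemma pvW_succ (k : Nat) : pvW (k+1) = pvStep (pvW k) := Function.iterate_succ_apply' pvStep k _

lemma pvgs_one_succ (k : Nat) : pvgs 1 (k+1) = pvg k := by simp [pvgs]

lemma pvgs_succ (j k : Nat) : pvgs (j+1) (k+1) = pvgs j k := by
  unfold pvgs
  rcases Nat.lt_or_ge k j with h | h
  · rw [if_pos (by omega), if_pos h]
  · rw [if_neg (by omega), if_neg (by omega)]; congr 1; omega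

lemma pvW_eq (k : Nat) : pvW k = (pvg k, pvgs 1 k, pvgs 2 k, pvgs 3 k, pvgs 4 k, pvgs 5 k) := by
  induction k with
  | zero => simp [pvW, pvg, pvgs]
  | succ k ih =>
    have hg : pvg (k+1)
        = PySem.Int.mod (pvg k + pvgs 1 k + pvgs 2 k + pvgs 3 k + pvgs 4 k + pvgs 5 k) pvM := by
      rw [pvg, pvW_succ, ih]; rfl
    rw [pvW_succ, ih]
    simp only [pvStep]
    rw [← hg, ← pvgs_one_succ k, ← pvgs_succ 1 k, ← pvgs_succ 2 k, ← pvgs_succ 3 k, ← pvgs_succ 4 k]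

lemma pvg_succ (k : Nat) :
    pvg (k+1) = PySem.Int.mod (pvg k + pvgs 1 k + pvgs 2 k + pvgs 3 k + pvgs 4 k + pvgs 5 k) pvM := by
  rw [pvg, pvW_succ, pvW_eq]; rfl

-- ---------- A computes pvg (this part: array-loop analysis) ----------
-- the dp array of A after outer iteration i = k: entries 0..k carry pvg, the rest 0
def pvD (N k : Nat) : Array Int :=
  ((List.range (N+1)).map (fun idx => if idx ≤ k then pvg idx else 0)).toArray

lemma pvD_size (N k : Nat) : (pvD N k).size = N + 1 := by simp [pvD]

lemma agetD (xs : Array Int) (i : Nat) (h : i < xs.size) : xs.getD i 0 = xs[i] := by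
  simp [Array.getD_eq_getD_getElem?, Array.getElem?_eq_getElem h]

lemma pvD_set_succ (N k : Nat) (_hk : k + 1 ≤ N) :
    (pvD N k).setIfInBounds (k+1) (pvg (k+1)) = pvD N (k+1) := by
  apply Array.ext (by simp [pvD])
  intro i h1 h2
  have hi : i < N + 1 := by simpa [pvD] using h2
  rw [Array.getElem_setIfInBounds (by simpa [pvD] using hi)]
  simp only [pvD, List.getElem_toArray, List.getElem_map, List.getElem_range]
  by_cases h : k + 1 = i
  · subst h; simp
  · rw [if_neg h]
    by_cases h' : i ≤ k
    · rw [if_pos h', if_pos (by omega)]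
    · rw [if_neg h', if_neg (by omega)]

lemma dp0_eq (N : Nat) : (Array.replicate (N+1) (0:Int)).setIfInBounds 0 1 = pvD N 0 := by
  apply Array.ext (by simp [pvD])
  intro i h1 h2
  have hi : i < N + 1 := by simpa using h1
  rw [Array.getElem_setIfInBounds (by simpa using hi)]
  simp only [pvD, List.getElem_toArray, List.getElem_map, List.getElem_range,
    Array.getElem_replicate]
  by_cases h : i = 0
  · subst h; norm_num [pvg, pvW]
  · rw [if_neg (by omega), if_neg (by omega)]

lemma step_if (N k : Nat) (hk : k + 1 ≤ N) (c jz : Int) (h1 : 1 ≤ jz) (h2 : jz ≤ (k:Int)+1) :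
    (if ((k:Int)+1) - jz ≥ 0 then
       ((pvD N k).setIfInBounds (k+1) c).setIfInBounds (k+1)
         (PySem.Int.mod (((pvD N k).setIfInBounds (k+1) c).getD (k+1) 0
           + ((pvD N k).setIfInBounds (k+1) c).getD (((k:Int)+1) - jz).toNat 0) pvM)
     else (pvD N k).setIfInBounds (k+1) c)
    = (pvD N k).setIfInBounds (k+1) (PySem.Int.mod (c + pvg (k+1 - jz.toNat)) pvM) := by
  have hsz : ((pvD N k).setIfInBounds (k+1) c).size = N + 1 := by
    simp [pvD]
  rw [if_pos (by omega)]
  have hget1 : ((pvD N k).setIfInBounds (k+1) c).getD (k+1) 0 = c := by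
    rw [agetD _ _ (by omega), Array.getElem_setIfInBounds (by rw [pvD_size]; omega), if_pos rfl]
  have hget2 : ((pvD N k).setIfInBounds (k+1) c).getD (((k:Int)+1) - jz).toNat 0
      = pvg (k + 1 - jz.toNat) := by
    have ht : (((k:Int)+1) - jz).toNat = k + 1 - jz.toNat := by omega
    rw [ht, agetD _ _ (by omega),
      Array.getElem_setIfInBounds (by rw [pvD_size]; omega), if_neg (by omega)]
    simp only [pvD, List.getElem_toArray, List.getElem_map, List.getElem_range]
    rw [if_pos (by omega)]
  rw [hget1, hget2, Array.setIfInBounds_setIfInBounds]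

lemma inner (N k : Nat) (hk : k + 1 ≤ N) :
    (PySem.List.pyRange 1 7 1).foldl
      (fun dp j => if ((k:Int)+1) - j ≥ 0 then
          dp.setIfInBounds ((k:Int)+1).toNat
            (PySem.Int.mod (dp.getD ((k:Int)+1).toNat 0 + dp.getD (((k:Int)+1) - j).toNat 0) pvM)
        else dp)
      ((pvD N k).setIfInBounds ((k:Int)+1).toNat 0)
    = pvD N (k+1) := by
  have hrange : PySem.List.pyRange 1 7 1 = [1,2,3,4,5,6] := by decide
  rw [hrange]
  simp only [List.foldl_cons, List.foldl_nil, show ((k:Int)+1).toNat = k + 1 from by omega]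
  rw [step_if N k hk _ 1 (by omega) (by omega), ← pvD_set_succ N k hk]
  rcases Nat.lt_or_ge k 5 with hk5 | hk5
  · interval_cases k
    · rw [if_neg (by omega), if_neg (by omega), if_neg (by omega),
        if_neg (by omega), if_neg (by omega)]
      congr 1
    · rw [step_if N 1 hk _ 2 (by omega) (by omega),
        if_neg (by omega), if_neg (by omega), if_neg (by omega), if_neg (by omega)]
      congr 1
    · rw [step_if N 2 hk _ 2 (by omega) (by omega),
        step_if N 2 hk _ 3 (by omega) (by omega),
        if_neg (by omega), if_neg (by omega), if_neg (by omega)]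
      congr 1
    · rw [step_if N 3 hk _ 2 (by omega) (by omega),
        step_if N 3 hk _ 3 (by omega) (by omega),
        step_if N 3 hk _ 4 (by omega) (by omega),
        if_neg (by omega), if_neg (by omega)]
      congr 1
    · rw [step_if N 4 hk _ 2 (by omega) (by omega),
        step_if N 4 hk _ 3 (by omega) (by omega),
        step_if N 4 hk _ 4 (by omega) (by omega),
        step_if N 4 hk _ 5 (by omega) (by omega),
        if_neg (by omega)]
      congr 1
  · rw [step_if N k hk _ 2 (by omega) (by omega),
      step_if N k hk _ 3 (by omega) (by omega),
      step_if N k hk _ 4 (by omega) (by omega),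
      step_if N k hk _ 5 (by omega) (by omega),
      step_if N k hk _ 6 (by omega) (by omega)]
    congr 1
    rw [pvg_succ]
    have hM : (0:Int) < pvM := by norm_num [pvM]
    have e1 : k + 1 - (1:Int).toNat = k := by omega
    have e2 : k + 1 - (2:Int).toNat = k - 1 := by omega
    have e3 : k + 1 - (3:Int).toNat = k - 2 := by omega
    have e4 : k + 1 - (4:Int).toNat = k - 3 := by omega
    have e5 : k + 1 - (5:Int).toNat = k - 4 := by omega
    have e6 : k + 1 - (6:Int).toNat = k - 5 := by omega
    rw [e1, e2, e3, e4, e5, e6]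
    have g1 : pvgs 1 k = pvg (k - 1) := if_neg (by omega)
    have g2 : pvgs 2 k = pvg (k - 2) := if_neg (by omega)
    have g3 : pvgs 3 k = pvg (k - 3) := if_neg (by omega)
    have g4 : pvgs 4 k = pvg (k - 4) := if_neg (by omega)
    have g5 : pvgs 5 k = pvg (k - 5) := if_neg (by omega)
    rw [g1, g2, g3, g4, g5]
    simp only [PySem.Int.mod_eq_emod_of_pos hM]
    norm_num [pvM]

lemma outer (N k : Nat) :
    k ≤ N →
    (PySem.List.pyRange 1 ((k:Int)+1) 1).foldl
      (fun dp i =>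
        (PySem.List.pyRange 1 7 1).foldl
          (fun dp j => if i - j ≥ 0 then
              dp.setIfInBounds i.toNat
                (PySem.Int.mod (dp.getD i.toNat 0 + dp.getD (i - j).toNat 0) pvM)
            else dp)
          (dp.setIfInBounds i.toNat 0))
      (pvD N 0)
    = pvD N k := by
  induction k with
  | zero =>
    intro _
    rw [show PySem.List.pyRange 1 (((0:Nat):Int)+1) 1 = [] from
      PySem.List.pyRange_one_eq_nil (by norm_num)]
    rfl
  | succ k ih =>
    intro hk
    have hsplit : PySem.List.pyRange 1 (((k+1:Nat):Int)+1) 1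
        = PySem.List.pyRange 1 ((k:Int)+1) 1 ++ [(k:Int)+1] := by
      have h : (((k+1:Nat):Int)+1) = ((k:Int)+1) + 1 := by push_cast; ring
      rw [h, PySem.List.pyRange_one_succ_right (by omega)]
    rw [hsplit, List.foldl_append, ih (by omega)]
    simp only [List.foldl_cons, List.foldl_nil]
    exact inner N k (by omega)

lemma A_final (N : Nat) : (pvD N N).getD ((N:Int)).toNat 0 = pvg N := by
  rw [show ((N:Int)).toNat = N from by omega, agetD _ _ (by rw [pvD_size]; omega)]
  simp only [pvD, List.getElem_toArray, List.getElem_map, List.getElem_range]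
  simp

lemma A_eq (n : Int) (h : 0 ≤ n) : count_ways_to_sum n = pvg (2 * n).toNat := by
  simp only [count_ways_to_sum]
  rw [show (10:Int) ^ 9 + 7 = pvM from rfl]
  set N := (2 * n).toNat with hNdef
  rw [show 2 * n = (N : Int) from by omega]
  rw [show ((N : Int) + 1).toNat = N + 1 from by omega]
  rw [dp0_eq, outer N N (le_refl N)]
  exact A_final N

-- ---------- B computes pvg (this part: matrices over ZMod) ----------

lemma range6 : List.range 6 = [0,1,2,3,4,5] := rfl

lemma getD_map_range6 {a : Type} (f : Nat → a) (d : a) (i : Fin 6) :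
    ((List.range 6).map f).getD (i : Nat) d = f (i : Nat) := by
  rw [List.getD_eq_getElem?_getD, List.getElem?_map, List.getElem?_range i.isLt]; rfl

lemma castMod (x : Int) :
    ((PySem.Int.mod x ((10:Int) ^ 9 + 7) : Int) : ZMod 1000000007) = (x : ZMod 1000000007) := by
  rw [PySem.Int.mod_eq_emod_of_pos (by norm_num)]
  rw [show ((10:Int) ^ 9 + 7) = ((1000000007 : Nat) : Int) from by norm_num]
  exact ZMod.intCast_mod x 1000000007

def pvToM (A : List (List Int)) : Matrix (Fin 6) (Fin 6) (ZMod 1000000007) :=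
  Matrix.of (fun i j => (((A.getD (i:Nat) []).getD (j:Nat) 0 : Int) : ZMod 1000000007))

lemma toM_mult (A B : List (List Int)) : pvToM (pvMatMult A B) = pvToM A * pvToM B := by
  ext i j
  rw [Matrix.mul_apply, Fin.sum_univ_six]
  show (((pvMatMult A B).getD (i:Nat) []).getD (j:Nat) 0 : ZMod 1000000007) = _
  unfold pvMatMult
  rw [getD_map_range6, getD_map_range6, range6]
  simp only [List.foldl_cons, List.foldl_nil, castMod]
  simp only [pvToM, Matrix.of_apply, Fin.isValue,
    show ((0:Fin 6):Nat) = 0 from rfl, show ((1:Fin 6):Nat) = 1 from rfl,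
    show ((2:Fin 6):Nat) = 2 from rfl, show ((3:Fin 6):Nat) = 3 from rfl,
    show ((4:Fin 6):Nat) = 4 from rfl, show ((5:Fin 6):Nat) = 5 from rfl]
  push_cast
  ring

lemma toM_I : pvToM pvI = 1 := by
  ext i j
  show ((((pvI).getD (i:Nat) []).getD (j:Nat) 0 : Int) : ZMod 1000000007) = _
  unfold pvI
  rw [getD_map_range6, getD_map_range6, Matrix.one_apply]
  by_cases h : (i:Nat) = (j:Nat)
  · rw [if_pos h, if_pos (Fin.ext h)]; norm_num
  · rw [if_neg h, if_neg (fun hh => h (congrArg Fin.val hh))]; norm_num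

lemma toM_pow (e : Nat) : ∀ R M : List (List Int),
    pvToM (pvMatPow R M e) = pvToM R * (pvToM M) ^ e := by
  induction e using Nat.strong_induction_on with
  | _ e ih =>
    intro R M
    unfold pvMatPow
    split
    · rename_i h; subst h; simp
    · rename_i h
      rw [ih (e / 2) (Nat.div_lt_self (Nat.pos_of_ne_zero h) (by norm_num)), toM_mult,
        ← pow_two, ← pow_mul]
      by_cases hp : e % 2 = 1
      · rw [if_pos hp, toM_mult, mul_assoc, ← pow_succ', show 2 * (e / 2) + 1 = e from by omega]
      · rw [if_neg hp, show 2 * (e / 2) = e from by omega]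

-- the window as a ZMod vector
def pvU (k : Nat) : Fin 6 → ZMod 1000000007 :=
  ![((pvg k : Int) : ZMod 1000000007), ((pvgs 1 k : Int) : ZMod 1000000007),
    ((pvgs 2 k : Int) : ZMod 1000000007), ((pvgs 3 k : Int) : ZMod 1000000007),
    ((pvgs 4 k : Int) : ZMod 1000000007), ((pvgs 5 k : Int) : ZMod 1000000007)]

lemma toMC_mulVec (k : Nat) : Matrix.mulVec (pvToM pvC) (pvU k) = pvU (k + 1) := by
  funext i
  simp only [Matrix.mulVec, dotProduct, Fin.sum_univ_six]
  fin_cases i <;>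
    norm_num [pvToM, pvC, pvU, Matrix.cons_val_zero, Matrix.cons_val_one, Matrix.cons_val]
  · rw [pvg_succ, show pvM = (10:Int) ^ 9 + 7 from rfl, castMod]; push_cast; ring
  · rw [pvgs_one_succ]
  · rw [show pvgs 2 (k+1) = pvgs 1 k from pvgs_succ 1 k]
  · rw [show pvgs 3 (k+1) = pvgs 2 k from pvgs_succ 2 k]; rfl
  · rw [show pvgs 4 (k+1) = pvgs 3 k from pvgs_succ 3 k]; rfl
  · rw [show pvgs 5 (k+1) = pvgs 4 k from pvgs_succ 4 k]; rfl

lemma pow_vec (k : Nat) : Matrix.mulVec ((pvToM pvC) ^ k) (pvU 0) = pvU k := by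
  induction k with
  | zero => simp
  | succ k ih =>
    rw [pow_succ', ← Matrix.mulVec_mulVec, ih, toMC_mulVec]

lemma pvU_zero : pvU 0 = ![1, 0, 0, 0, 0, 0] := by
  funext i
  fin_cases i <;> simp [pvU, pvg, pvW, pvgs]

lemma pow_entry (e : Nat) :
    ((pvToM pvC) ^ e) 0 0 = ((pvg e : Int) : ZMod 1000000007) := by
  have h := congrFun (pow_vec e) 0
  rw [pvU_zero] at h
  simp only [Matrix.mulVec, dotProduct, Fin.sum_univ_six, Matrix.cons_val_zero,
    Matrix.cons_val_one, Matrix.cons_val, mul_one, mul_zero, add_zero] at h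
  simpa [pvU] using h

-- the [0][0] entry of a list matrix
def pvE00 (X : List (List Int)) : Int := (X.getD 0 []).getD 0 0

lemma e00_mult (A B : List (List Int)) : 0 ≤ pvE00 (pvMatMult A B) ∧ pvE00 (pvMatMult A B) < pvM := by
  have h : pvE00 (pvMatMult A B) = PySem.Int.mod ((List.range 6).foldl
      (fun s k => s + ((A.getD 0 []).getD k 0) * ((B.getD k []).getD 0 0)) 0) ((10:Int) ^ 9 + 7) := by
    simp [pvE00, pvMatMult, range6]
  have hM : (0:Int) < pvM := by norm_num [pvM]
  rw [h, show ((10:Int) ^ 9 + 7) = pvM from rfl, PySem.Int.mod_eq_emod_of_pos hM]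
  exact ⟨Int.emod_nonneg _ (by norm_num [pvM]), Int.emod_lt_of_pos _ hM⟩

lemma e00_pow (e : Nat) : ∀ R M : List (List Int),
    0 ≤ pvE00 R → pvE00 R < pvM → 0 ≤ pvE00 (pvMatPow R M e) ∧ pvE00 (pvMatPow R M e) < pvM := by
  induction e using Nat.strong_induction_on with
  | _ e ih =>
    intro R M h0 h1
    unfold pvMatPow
    split
    · exact ⟨h0, h1⟩
    · rename_i h
      apply ih (e / 2) (Nat.div_lt_self (Nat.pos_of_ne_zero h) (by norm_num))
      · by_cases hp : e % 2 = 1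
        · rw [if_pos hp]; exact (e00_mult R M).1
        · rw [if_neg hp]; exact h0
      · by_cases hp : e % 2 = 1
        · rw [if_pos hp]; exact (e00_mult R M).2
        · rw [if_neg hp]; exact h1

lemma pvg_bounds (k : Nat) : 0 ≤ pvg k ∧ pvg k < pvM := by
  cases k with
  | zero => norm_num [pvg, pvW, pvM]
  | succ k =>
    rw [pvg_succ, PySem.Int.mod_eq_emod_of_pos (by norm_num [pvM])]
    exact ⟨Int.emod_nonneg _ (by norm_num [pvM]), Int.emod_lt_of_pos _ (by norm_num [pvM])⟩

lemma cast_inj_range (a b : Int) (ha0 : 0 ≤ a) (ha1 : a < pvM) (hb0 : 0 ≤ b) (hb1 : b < pvM)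
    (h : (a : ZMod 1000000007) = (b : ZMod 1000000007)) : a = b := by
  rw [ZMod.intCast_eq_intCast_iff'] at h
  have hc : ((1000000007 : Nat) : Int) = pvM := by norm_num [pvM]
  rwa [hc, Int.emod_eq_of_lt ha0 ha1, Int.emod_eq_of_lt hb0 hb1] at h

lemma alt_eq_pvg (e : Nat) : pvE00 (pvMatPow pvI pvC e) = pvg e := by
  have hcast : ((pvE00 (pvMatPow pvI pvC e) : Int) : ZMod 1000000007)
      = ((pvg e : Int) : ZMod 1000000007) := by
    have h1 : ((pvE00 (pvMatPow pvI pvC e) : Int) : ZMod 1000000007)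
        = pvToM (pvMatPow pvI pvC e) 0 0 := rfl
    rw [h1, toM_pow, toM_I, one_mul, pow_entry]
  have hI0 : (0:Int) ≤ pvE00 pvI := by norm_num [pvE00, pvI, range6]
  have hI1 : pvE00 pvI < pvM := by norm_num [pvE00, pvI, range6, pvM]
  obtain ⟨h0, h1⟩ := e00_pow e pvI pvC hI0 hI1
  obtain ⟨g0, g1⟩ := pvg_bounds e
  exact cast_inj_range _ _ h0 h1 g0 g1 hcast

lemma B_eq (n : Int) : count_ways_to_sum_alt n = pvg (2 * n).toNat := by
  simpa only [count_ways_to_sum_alt] using alt_eq_pvg (2 * n).toNat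

-- ===== VERDICT (by name: the statements are the Claim_ definitions above) =====
theorem count_ways_to_sum_spec : Claim_equal_count_ways_to_sum := by
  intro n _ hpre
  unfold Pre_count_ways_to_sum at hpre
  unfold Spec_count_ways_to_sum
  rw [A_eq n hpre, B_eq n]
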